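/- GENERATED by mk_final_copies.py from the proof of the farm's unit `start_decoder.F4b` (farm:start_decoder.F4b.1: Lemmas.lean) as the
   re-elaboration sweep compiled it — do not edit. -/
import Asan.CheckWalk
import Vorbis.Spec.Reader
import Vorbis.Spec.Units.start_decoder_F4b

open X86 X86.User Asan Vorbis Vorbis.Spec Vorbis.Spec.StartDecoder

set_option maxRecDepth 4000
set_option maxHeartbeats 4000000

namespace Vorbis.Spec.start_decoder_F4b

/-- **The return of `get_bits(f, 3)`** (`cut208` = 0x1154af, `lea r15d,[rax+1]`): a cut point INSIDE the unit, between its two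
lemmas: the class head's facts with `j ≤ max_class` and eax = the three bits. -/
structure F4bMid (u₀ : State) (g : Ghost) (i : Nat) (A5 : Arena) (A : Arena × List Obj) (mc : Int) (j : Nat) (v : State) :
    Prop where
  /-- the segment's common part at `cut208` -/
  in4 : In4 u₀ g i A5 A mc Vorbis.L.start_decoder.cut208 v
  /-- r12d = j -/
  r12 : v.reg .r12 = addr j
  /-- `j ≤ max_class` (`jg` 0x11549c not taken) -/
  j_le : (j : Int) ≤ mc
  /-- FL6 for every class below `j` -/
  classes : ClassesUpTo v.mem (floorAt g v.mem i) (stb_vorbis.codebook_count v.mem g.f) j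
  /-- the result of `get_bits(f, 3)` (the full register) -/
  rax : (v.reg .rax).toNat < 8

/-- The six windows of a `get_bits` call seen from the caller (the callee's stack with the pushed return address, the bit
reader's five windows of `*f`) are allowed windows of the floor section; no part of the element is written. -/
theorem f4b_call_wins (g : Ghost) (G : Nat) (hR : 408 ≤ g.R) (hRA : g.R + 1480 = g.RA) :
    ∀ w, w ∈ [(⟨g.R - 408, g.R⟩ : Span), ⟨g.f + 48, g.f + 56⟩, ⟨g.f + 84, g.f + 96⟩, ⟨g.f + 136, g.f + 144⟩,
        ⟨g.f + 1484, g.f + 1749⟩, ⟨g.f + 1752, g.f + 1784⟩] → Floor.Win g G 1596 1596 w := by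
  intro w hw
  simp only [List.mem_cons, List.mem_nil_iff, or_false] at hw
  unfold Floor.Win
  rcases hw with rfl | rfl | rfl | rfl | rfl | rfl
  all_goals simp only []
  all_goals omega

/-- **0x115499 → `AtF5` (the parent's exit) or the return of `get_bits(f, 3)`.** `cmp r12d,r13d ; jg` taken (`max_class < j`): `AtF5`
with the class counter `n = j` (`Floor5.mc_lt`); not taken: the call, and `F4bMid` at its return by `Floor.carry` (no byte of the
element is written: `Floor.floor4_carry`, `Floor.classes_carry` with the empty part `[1596, 1596)`). -/
theorem f4b_head {Lay : Layout} (hLay : Lay.hi = 0x1000000) {μ : Microarch} (hμ : UserX.MicroOK μ) {u₀ : State}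
    (hcode : HasCodeNat Lay u₀ Vorbis.L.start_decoder.entry Vorbis.Code.code_start_decoder.nat Vorbis.L.start_decoder.size)
    (hgb : ∀ (others : List Obj) (frames : List (Nat × FrameLayout)) (Blk : Block → Prop) (len : Nat),
      Calls Lay μ Vorbis.WayInv (Vorbis.conv u₀) Vorbis.L.get_bits.entry (Vorbis.Spec.get_bits.spec others frames Blk len))
    {g : Ghost} {i : Nat} {A5 : Arena} {A : Arena × List Obj} {mc : Int} {j : Nat} {v : State}
    (hat : AtClassHead u₀ g i A5 A mc j v) :
    ReachVia Lay μ WayInv v (fun w => AtF5 u₀ g i w ∨ F4bMid u₀ g i A5 A mc j w) := by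
  have hloop := hat.in4.loop
  have hlt := hat.in4.cur.lt
  have hfr := hloop.frame
  have he := hfr.entry
  v_entry he
  simp only [depth] at he_room he_stack
  have hgb' := hgb A.2 g.frames' (g.Blk A) g.len
  have hgeo := Floor.geo hloop hlt
  obtain ⟨r8, rlo, rhi, ra, flo, fhi, fstack, farena, flog, fc1, fc64, ilt, gdef, blo, bhi, btext, bstack, bdata, blog⟩ := hgeo
  have hmc1 := hat.in4.cur.mc_lo
  have hmc2 := hat.in4.cur.mc_hi
  have hj := hat.j_le
  obtain ⟨R, hR⟩ : ∃ R, R = g.R := ⟨_, rfl⟩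
  obtain ⟨f, hfe⟩ : ∃ f, f = g.f := ⟨_, rfl⟩
  have w_rip := hfr.rip
  have c_rsp := hfr.rsp
  have c_rbp := hloop.rbp
  have c_r12 := hat.r12
  have c_r13 := hat.in4.r13
  rw [← hR] at c_rsp r8 rlo rhi ra fstack
  rw [← hfe] at c_rbp flo fhi fstack farena flog
  simp only [addr] at c_rsp c_rbp
  have w_eq : Mem.EqOn Vorbis.L.textLo Vorbis.L.textHi u₀.mem v.mem := hfr.code
  have hdf : v.flags .df = false := (show abiInv _ from hfr.inv).1
  have hmx : v.mxcsr &&& 0x1F80 = 0x1F80 := (show abiInv _ from hfr.inv).2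
  have hsse := Vorbis.sseOK_of_abiInv hfr.inv
  clear fc1 fc64 ilt gdef blo bhi btext bstack bdata blog
  u_walk hcode [hμ.vendor] until [Vorbis.L.start_decoder.cut215, Vorbis.L.start_decoder.cut208] span [Vorbis.L.textLo, Vorbis.L.textHi] side (v_side)
  · -- call_inv
    v_inv
  · -- the precondition of get_bits(f, 3)
    have hun : ShadowUntouched v.mem s_1154aa.mem := by v_untouched
    have hrdi : (s_1154aa.reg .rdi).toNat = g.f := by
      rw [w_rdi, hfe]
      exact toNat_addr g.f (by omega)
    refine ⟨Floor.reader_pre hloop ?_ hun hrdi ?_, ?_⟩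
    · rw [w_rsp, ← hR]
      u_omega
    · rw [w_mem]
      refine Floor.bits_push hloop _ 8 _ ?_ ?_
      · rw [← hR]
        u_omega
      · u_omega
    · rw [bitsArg_def, w_rsi]
      decide
  · -- 0x1155c7: the loop is left, `max_class < j`: `AtF5` with `n = j`
    rw [Floor.s32_word32 mc (by omega) (by omega), Floor.s32_addr j (by omega)] at hbr_11549c
    have hinv : abiInv s_11549c := by
      refine ⟨?_, ?_⟩
      · rw [w_flags]
        simp only [X86.User.df_setStatus]
        exact hdf
      · rw [w_mxcsr]
        exact hmx
    have hrsp : s_11549c.reg .rsp = addr g.R := by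
      rw [w_kept .rsp rfl]
      exact hfr.rsp
    have hrbp : s_11549c.reg .rbp = addr g.f := by
      rw [w_kept .rbp rfl]
      exact hloop.rbp
    have hloop' := Floor.same_mem hloop w_mem w_rip hrsp hrbp hinv
    refine ReachVia.done (Or.inl ⟨A5, A, mc, j, hloop', ?_, ?_, ?_, hbr_11549c⟩)
    · rw [w_kept .rbx rfl, w_mem]
      exact hat.in4.rbx
    · rw [w_mem]
      exact hat.in4.cur
    · rw [w_mem]
      exact hat.classes
  · -- the return of get_bits(f, 3): the cut point 0x1154af
    rw [Floor.s32_word32 mc (by omega) (by omega), Floor.s32_addr j (by omega)] at hbr_11549c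
    have hrdi : (s_1154aa.reg .rdi).toNat = f := by
      rw [w_rdi_1154aa]
      exact toNat_addr f (by omega)
    obtain ⟨hpu, hpb⟩ := w_post
    rw [hrdi] at hpb
    v_after_call w_rsp_1154aa w_mem_1154aa
    simp only [w_rdi_1154aa] at w_same
    have hun0 : ShadowUntouched v.mem s_1154aa.mem := by
      rw [w_mem_1154aa]
      v_untouched
    have hun : ShadowUntouched v.mem s_1154aar.mem := Mem.EqOn.trans hun0 hpu
    have hsame : Mem.SameExcept [⟨R - 408, R⟩, ⟨f + 48, f + 56⟩, ⟨f + 84, f + 96⟩, ⟨f + 136, f + 144⟩,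
        ⟨f + 1484, f + 1749⟩, ⟨f + 1752, f + 1784⟩] v.mem s_1154aar.mem := by
      u_same
    rw [hR, hfe] at hsame
    have hws := f4b_call_wins g (floorAt g v.mem i) (by omega) (by omega)
    have earg : bitsArg s_1154aa = 3 := by
      rw [bitsArg_def, w_rsi_1154aa]
      rfl
    have e1 : s_1154aar.reg .rsp = addr g.R := by
      rw [w_rsp, hR]
      rfl
    have e2 : s_1154aar.reg .rbp = addr g.f := by
      rw [w_kept .rbp rfl, c_rbp, hfe]
      rfl
    have hbits' : Bits (g.Blk A) g.len s_1154aar.mem g.f := by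
      rw [← hfe]
      exact hpb.bits
    have hloop' := Floor.carry hloop hlt (Nat.le_refl _) w_rip e1 e2 w_inv w_eq hsame hws hun hbits'
    have hgeo := Floor.geo hloop hlt
    obtain ⟨eG, _, ecc, _⟩ := Floor.fields_same hgeo hsame hws (Nat.le_refl _)
    have hcur' := Floor.floor4_carry hgeo hat.in4.cur (by omega) (Nat.le_refl _) (Nat.le_refl _) hsame hws
    have hcl' := Floor.classes_carry hgeo hat.classes (by omega) (by omega) (Nat.le_refl _) (Nat.le_refl _) hsame
      (fun w hw => (hws w hw).winT)
    refine ReachVia.done (Or.inr ⟨⟨hloop', ?_, ?_, hcur'⟩, ?_, by omega, ?_, ?_⟩)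
    · rw [eG, w_kept .rbx rfl]
      exact hat.in4.rbx
    · rw [w_kept .r13 rfl]
      exact hat.in4.r13
    · rw [w_kept .r12 rfl]
      exact hat.r12
    · rw [eG, ecc]
      exact hcl'
    · have h2 := hpb.result.2 (by rw [earg]; decide)
      rw [earg] at h2
      exact h2

end Vorbis.Spec.start_decoder_F4b
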